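-- pv_equiv track=rewrite | github.com/james4388/algorithm-1 | algorithms/google/ParseLispExpression.py | parse
-- ===== SOURCE A (Python) =====
-- def parse(exp):
--     res, builder = [], ""
--     balance = 0
--     for c in exp:
--         if c == '(':
--             balance += 1
--         if c == ')' :
--             balance -= 1
--         if balance == 0 and c == ' ':
--             res.append(builder)
--             builder = ""
--         else:
--             builder += c
--
--     if len(builder) > 0:
--         res.append(builder)
--     return res
-- ===== SOURCE B (Python) =====
-- def parse(exp):
--     # One pass records the indices of top-level spaces; the result is then
--     # built by slicing exp between consecutive boundary indices.
--     bal = 0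
--     cuts = []
--     for i, c in enumerate(exp):
--         if c == '(':
--             bal += 1
--         elif c == ')':
--             bal -= 1
--         elif c == ' ' and bal == 0:
--             cuts.append(i)
--     starts = [-1] + cuts
--     segs = [exp[a + 1:b] for a, b in zip(starts, cuts)]
--     tail = exp[(cuts[-1] if cuts else -1) + 1:]
--     if tail:
--         segs.append(tail)
--     return segs
-- ===== Notes on version B (the rewrite author's own statement) =====
-- stated objective: alternative
-- what changed: A tokenizes by accumulating characters into a growing builder string that it flushes at each top-level space; B instead records only the indices of top-level spaces in one balance-tracking scan and then builds the result by slicing the input between consecutive boundary indices (dropping a final empty slice).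
import Mathlib
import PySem

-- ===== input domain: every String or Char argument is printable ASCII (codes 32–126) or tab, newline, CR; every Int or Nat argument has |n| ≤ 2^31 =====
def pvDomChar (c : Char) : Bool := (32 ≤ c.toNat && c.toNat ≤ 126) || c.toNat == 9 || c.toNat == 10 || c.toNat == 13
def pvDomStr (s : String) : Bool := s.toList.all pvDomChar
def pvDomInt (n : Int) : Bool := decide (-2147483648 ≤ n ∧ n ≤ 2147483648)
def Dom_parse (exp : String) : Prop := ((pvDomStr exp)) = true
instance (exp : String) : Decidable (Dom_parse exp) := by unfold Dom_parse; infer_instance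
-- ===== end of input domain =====

-- B replaces A's character-accumulating tokenizer by a boundary-index scan followed by slicing (objective: alternative decomposition, same single-pass cost).

-- ===== PORT A =====
-- one loop iteration of A: state = (res, builder, balance); builder kept as List Char, turned into a String when appended
def parseStep (st : List String × List Char × Int) (c : Char) : List String × List Char × Int :=
  let balance := st.2.2
  let balance := if c = '(' then balance + 1 else balance
  let balance := if c = ')' then balance - 1 else balance
  if balance = 0 ∧ c = ' ' then (st.1 ++ [String.ofList st.2.1], [], balance)
  else (st.1, st.2.1 ++ [c], balance)

def parse (exp : String) : List String :=
  let st := exp.toList.foldl parseStep ([], [], 0)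
  if st.2.1.length > 0 then st.1 ++ [String.ofList st.2.1] else st.1

-- ===== PORT B =====
-- one loop iteration of B: state = (bal, cuts)
def parseAltScan (st : Int × List Int) (ic : Int × Char) : Int × List Int :=
  if ic.2 = '(' then (st.1 + 1, st.2)
  else if ic.2 = ')' then (st.1 - 1, st.2)
  else if ic.2 = ' ' ∧ st.1 = 0 then (st.1, st.2 ++ [ic.1])
  else st

def parse_alt (exp : String) : List String :=
  let cuts := ((PySem.List.enumerate exp.toList 0).foldl parseAltScan (0, [])).2
  let starts := (-1 : Int) :: cuts
  let segs := (starts.zip cuts).map (fun ab => PySem.Str.slice exp (some (ab.1 + 1)) (some ab.2))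
  let tail := PySem.Str.slice exp (some (cuts.getLastD (-1) + 1)) none
  if tail ≠ "" then segs ++ [tail] else segs

-- ===== PRECONDITION & SPEC =====
def Spec_parse (exp : String) (out : List String) : Prop := out = parse_alt exp
instance (exp : String) (out : List String) : Decidable (Spec_parse exp out) := by unfold Spec_parse; infer_instance

-- ===== CLAIM (what is proved, stated in full; the proofs are below) =====
def Claim_equal_parse : Prop := ∀ (exp : String), Dom_parse exp → Spec_parse exp (parse exp)

-- ===== LEMMAS AND PROOFS =====

-- evaluation of A's step on each kind of character
lemma parseStep_open (res : List String) (b : List Char) (bal : Int) :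
    parseStep (res, b, bal) '(' = (res, b ++ ['('], bal + 1) := by simp [parseStep]

lemma parseStep_close (res : List String) (b : List Char) (bal : Int) :
    parseStep (res, b, bal) ')' = (res, b ++ [')'], bal - 1) := by simp [parseStep]

lemma parseStep_space_zero (res : List String) (b : List Char) :
    parseStep (res, b, 0) ' ' = (res ++ [String.ofList b], [], 0) := by simp [parseStep]

lemma parseStep_space_nz (res : List String) (b : List Char) (bal : Int) (h : bal ≠ 0) :
    parseStep (res, b, bal) ' ' = (res, b ++ [' '], bal) := by simp [parseStep, h]

lemma parseStep_other (res : List String) (b : List Char) (bal : Int) (c : Char)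
    (h1 : c ≠ '(') (h2 : c ≠ ')') (h3 : c ≠ ' ') :
    parseStep (res, b, bal) c = (res, b ++ [c], bal) := by simp [parseStep, h1, h2, h3]

-- evaluation of B's step on each kind of character
lemma scan_open (bal : Int) (acc : List Int) (i : Int) :
    parseAltScan (bal, acc) (i, '(') = (bal + 1, acc) := by simp [parseAltScan]

lemma scan_close (bal : Int) (acc : List Int) (i : Int) :
    parseAltScan (bal, acc) (i, ')') = (bal - 1, acc) := by simp [parseAltScan]

lemma scan_space_zero (acc : List Int) (i : Int) :
    parseAltScan (0, acc) (i, ' ') = (0, acc ++ [i]) := by simp [parseAltScan]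

lemma scan_space_nz (bal : Int) (acc : List Int) (i : Int) (h : bal ≠ 0) :
    parseAltScan (bal, acc) (i, ' ') = (bal, acc) := by simp [parseAltScan, h]

lemma scan_other (bal : Int) (acc : List Int) (i : Int) (c : Char)
    (h1 : c ≠ '(') (h2 : c ≠ ')') (h3 : c ≠ ' ') :
    parseAltScan (bal, acc) (i, c) = (bal, acc) := by simp [parseAltScan, h1, h2, h3]

-- the cuts accumulator of B's scan is append-only
lemma scan_acc (l : List (Int × Char)) : ∀ (bal : Int) (acc : List Int),
    l.foldl parseAltScan (bal, acc) =
      ((l.foldl parseAltScan (bal, [])).1, acc ++ (l.foldl parseAltScan (bal, [])).2) := by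
  induction l with
  | nil => intro bal acc; simp
  | cons ic l ih =>
    intro bal acc
    simp only [List.foldl_cons, parseAltScan]
    split_ifs with h1 h2 h3
    · exact ih (bal + 1) acc
    · exact ih (bal - 1) acc
    · rw [ih bal (acc ++ [ic.1]), ih bal ([] ++ [ic.1])]
      simp
    · exact ih bal acc

-- every cut index produced by B's scan is ≥ the enumeration start
lemma scan_cuts_ge (cs : List Char) : ∀ (n bal x : Int),
    x ∈ ((PySem.List.enumerate cs n).foldl parseAltScan (bal, [])).2 → n ≤ x := by
  induction cs with
  | nil => intro n bal x hx; simp [PySem.List.enumerate_nil] at hx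
  | cons c cs ih =>
    intro n bal x hx
    rw [PySem.List.enumerate_cons, List.foldl_cons] at hx
    simp only [parseAltScan] at hx
    split_ifs at hx
    · have := ih (n + 1) (bal + 1) x hx; omega
    · have := ih (n + 1) (bal - 1) x hx; omega
    · rw [scan_acc] at hx
      simp only [List.nil_append, List.mem_append, List.mem_cons, List.not_mem_nil, or_false] at hx
      rcases hx with h | h
      · omega
      · have := ih (n + 1) bal x h; omega
    · have := ih (n + 1) bal x hx; omega

-- extending A's builder by the next character of the string
lemma take_snoc (full : List Char) (s n : Nat) (c : Char) (hs : s ≤ n)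
    (hc : full[n]? = some c) :
    (full.drop s).take (n - s) ++ [c] = (full.drop s).take (n - s + 1) := by
  rw [List.take_add_one, List.getElem?_drop, (by omega : s + (n - s) = n), hc]
  rfl

-- PySem string slicing seen on the List Char side
lemma str_slice_ofList (s : String) (a b : Option Int) :
    PySem.Str.slice s a b = String.ofList (PySem.List.slice s.toList a b) := by
  have h : (PySem.Str.slice s a b).toList = PySem.List.slice s.toList a b := by
    simp [PySem.Str.slice]
  rw [← h, String.ofList_toList]

lemma ofList_ne_empty_iff (l : List Char) : (String.ofList l ≠ "") ↔ 0 < l.length := by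
  constructor
  · intro hne
    cases l with
    | nil => exact absurd rfl hne
    | cons x xs => simp
  · intro hpos h
    have := congrArg String.toList h
    rw [String.toList_ofList] at this
    cases l with
    | nil => simp at hpos
    | cons x xs => simp at this

-- getLast? with default on a cons cell
lemma getD_last_cons {α : Type} (a d : α) (l : List α) :
    (a :: l).getLast?.getD d = l.getLast?.getD a := by
  rw [← List.getLastD_eq_getLast?, ← List.getLastD_eq_getLast?, List.getLastD_cons]

-- main invariant: A's fold over the suffix of the string starting at n, with builder
-- holding the characters since the last boundary s-1, equals the segments B slices
-- out of the cut indices its scan finds on the same suffix.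
lemma main_inv (full : List Char) (cs : List Char) : ∀ (n s : Nat) (bal : Int) (res : List String),
    s ≤ n → cs = full.drop n →
    cs.foldl parseStep (res, (full.drop s).take (n - s), bal) =
      (res ++ ((((s : Int) - 1) ::
          ((PySem.List.enumerate cs (n : Int)).foldl parseAltScan (bal, [])).2).zip
          ((PySem.List.enumerate cs (n : Int)).foldl parseAltScan (bal, [])).2).map
          (fun ab => String.ofList (PySem.List.slice full (some (ab.1 + 1)) (some ab.2))),
       full.drop ((((PySem.List.enumerate cs (n : Int)).foldl parseAltScan (bal, [])).2.getLastD ((s : Int) - 1) + 1).toNat),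
       ((PySem.List.enumerate cs (n : Int)).foldl parseAltScan (bal, [])).1) := by
  induction cs with
  | nil =>
    intro n s bal res hs hdrop
    have hlen : full.length ≤ n := List.drop_eq_nil_iff.mp hdrop.symm
    rw [List.take_of_length_le (by rw [List.length_drop]; omega)]
    simp [PySem.List.enumerate_nil, List.zip_nil_right]
  | cons c cs ih =>
    intro n s bal res hs hdrop
    have hne : full.drop n ≠ [] := by rw [← hdrop]; simp
    have hnlt : n < full.length := by
      by_contra h
      exact hne (List.drop_eq_nil_iff.mpr (by omega))
    have hc : full[n]? = some c := by
      have h0 : (full.drop n)[0]? = some c := by rw [← hdrop]; rfl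
      rw [List.getElem?_drop] at h0
      simpa using h0
    have hcs : cs = full.drop (n + 1) := by
      have := congrArg (List.drop 1) hdrop
      simpa [List.drop_drop] using this
    have hcast : ((n : Int) + 1) = ((n + 1 : Nat) : Int) := by push_cast; ring
    have hsub : n - s + 1 = n + 1 - s := by omega
    rw [List.foldl_cons, PySem.List.enumerate_cons, List.foldl_cons, hcast]
    by_cases hpo : c = '('
    · subst hpo
      rw [parseStep_open, scan_open, take_snoc full s n '(' hs hc, hsub]
      exact ih (n + 1) s (bal + 1) res (by omega) hcs
    · by_cases hpc : c = ')'
      · subst hpc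
        rw [parseStep_close, scan_close, take_snoc full s n ')' hs hc, hsub]
        exact ih (n + 1) s (bal - 1) res (by omega) hcs
      · by_cases hsp : c = ' '
        · subst hsp
          by_cases hbz : bal = 0
          · subst hbz
            rw [parseStep_space_zero, scan_space_zero, List.nil_append,
                scan_acc (PySem.List.enumerate cs ((n + 1 : Nat) : Int)) 0 [(n : Int)]]
            have ihh := ih (n + 1) (n + 1) 0
              (res ++ [String.ofList ((full.drop s).take (n - s))]) (le_refl _) hcs
            rw [Nat.sub_self, List.take_zero] at ihh
            rw [ihh]
            have hc1 : (((n + 1 : Nat) : Int) - 1) = (n : Int) := by push_cast; ring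
            rw [hc1]
            have hseg2 : ((s : Int) - 1 + 1) = ((s : Nat) : Int) := by ring
            simp [List.zip_cons_cons, hseg2, PySem.List.slice_natCast, getD_last_cons]
          · rw [parseStep_space_nz res _ bal hbz, scan_space_nz bal [] (n : Int) hbz,
                take_snoc full s n ' ' hs hc, hsub]
            exact ih (n + 1) s bal res (by omega) hcs
        · rw [parseStep_other res _ bal c hpo hpc hsp, scan_other bal [] (n : Int) c hpo hpc hsp,
              take_snoc full s n c hs hc, hsub]
          exact ih (n + 1) s bal res (by omega) hcs

-- ===== VERDICT (by name: the statement is the Claim_ definition above) =====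
theorem parse_spec : Claim_equal_parse := by
  unfold Claim_equal_parse
  intro exp _
  unfold Spec_parse
  have h := main_inv exp.toList exp.toList 0 0 0 [] (le_refl 0) (by simp)
  simp only [Nat.sub_self, List.take_zero, Nat.cast_zero, zero_sub, List.drop_zero] at h
  simp only [parse, parse_alt]
  rw [h]
  have hg : (0 : Int) ≤ (((PySem.List.enumerate exp.toList 0).foldl parseAltScan (0, [])).2.getLastD (-1)) + 1 := by
    rw [List.getLastD_eq_getLast?]
    cases hl : ((PySem.List.enumerate exp.toList 0).foldl parseAltScan (0, [])).2.getLast? with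
    | none => simp
    | some x =>
      have := scan_cuts_ge exp.toList 0 0 x (List.mem_of_getLast? hl)
      simp only [Option.getD_some]
      omega
  simp only [str_slice_ofList, PySem.List.slice_from _ hg, ofList_ne_empty_iff, gt_iff_lt]
  split_ifs with h1
  · rfl
  · rfl
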